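-- pv_equiv track=rewrite | github.com/hiteshpindikanti/Coding_Questions | DCP/DCP81.py | get_all_possibilities
-- ===== SOURCE A (Python) =====
-- def get_all_possibilities(mapping: dict, msg: str) -> list:
--     msgs_list = []
--     stack = [(mapping[msg[0]], msg[1:])]
--     while stack:
--         current_list, msg = stack.pop(-1)
--         if msg:
--             new_list = []
--             for val in mapping[msg[0]]:
--                 new_list.extend(map(lambda x: x + val, current_list))
--             stack.append((new_list, msg[1:]))
--         else:
--             msgs_list.extend(current_list)
--
--     return msgs_list
-- ===== SOURCE B (Python) =====
-- def get_all_possibilities(mapping: dict, msg: str) -> list: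
--     if len(msg) == 1:
--         return list(mapping[msg[0]])
--     rest = get_all_possibilities(mapping, msg[:-1])
--     return [p + v for v in mapping[msg[-1]] for p in rest]
-- ===== Notes on version B (the rewrite author's own statement) =====
-- stated objective: simpler
-- what changed: Replaced A's explicit stack-driven while loop (pushing intermediate product lists) by a short direct recursion on msg[:-1] that combines the last character's options with the recursive result.
import Mathlib
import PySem

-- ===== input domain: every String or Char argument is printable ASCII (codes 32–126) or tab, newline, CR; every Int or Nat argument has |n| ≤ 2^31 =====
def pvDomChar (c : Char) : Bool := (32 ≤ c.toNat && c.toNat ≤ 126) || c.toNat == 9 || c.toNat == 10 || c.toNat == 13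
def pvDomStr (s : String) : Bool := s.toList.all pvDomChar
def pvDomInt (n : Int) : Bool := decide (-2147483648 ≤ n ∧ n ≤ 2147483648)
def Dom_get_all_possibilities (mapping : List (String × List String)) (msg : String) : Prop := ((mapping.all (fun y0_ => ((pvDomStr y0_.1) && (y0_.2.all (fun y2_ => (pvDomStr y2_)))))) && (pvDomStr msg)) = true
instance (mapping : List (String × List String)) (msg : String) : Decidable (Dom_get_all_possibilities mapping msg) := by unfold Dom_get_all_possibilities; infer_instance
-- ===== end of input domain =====

-- B replaces A's explicit stack-driven while loop by a short recursion on msg[:-1];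
-- objective: simpler (same output, same order, no speed claim).
-- RETURN-value equivalence only; neither program mutates its arguments.

-- mapping[k] for the 1-char string k (both Pythons); the missing-key case (Python KeyError)
-- is excluded by Pre_, the .getD [] default is never reached inside Pre_.
def pvLookup (mapping : List (String × List String)) (c : Char) : List String :=
  (PySem.Dict.get? (PySem.Dict.mk mapping) (String.singleton c)).getD []

-- ===== PORT A =====
-- the while loop over the explicit stack (top of stack = head of the list; pop(-1)/append act there)
def pvALoop (mapping : List (String × List String)) :
    List (List String × List Char) → List String → List String
  | [], acc => acc
  | (cur, m) :: rest, acc =>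
    match m with
    | c :: ms =>
      -- new_list = []; for val in mapping[msg[0]]: new_list.extend(map(lambda x: x + val, current_list))
      let newList := (pvLookup mapping c).foldl (fun nl val => nl ++ cur.map (fun x => x ++ val)) []
      pvALoop mapping ((newList, ms) :: rest) acc
    | [] => pvALoop mapping rest (acc ++ cur)
termination_by stack _ => (stack.map (fun p => p.2.length + 1)).sum
decreasing_by all_goals simp

def get_all_possibilities (mapping : List (String × List String)) (msg : String) : List String :=
  match msg.toList with
  | [] => []   -- Python: IndexError on msg[0]; excluded by Pre_
  | c :: ms => pvALoop mapping [(pvLookup mapping c, ms)] []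

-- ===== PORT B =====
def pvBRec (mapping : List (String × List String)) (cs : List Char) : List String :=
  match cs with
  | [] => []   -- Python B never returns here (unbounded recursion); excluded by Pre_
  | [c] => pvLookup mapping c
  | c1 :: c2 :: rest =>
    let rest' := pvBRec mapping (c1 :: c2 :: rest).dropLast
    ((pvLookup mapping ((c1 :: c2 :: rest).getLast!)).flatMap
      (fun v => rest'.map (fun p => p ++ v)))
termination_by cs.length
decreasing_by simp

def get_all_possibilities_alt (mapping : List (String × List String)) (msg : String) : List String :=
  pvBRec mapping msg.toList

-- ===== PRECONDITION & SPEC =====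
-- Pre_ excludes exactly the inputs where Python A raises: the empty message (IndexError on
-- msg[0]) and messages containing a character missing from the mapping (KeyError).
def Pre_get_all_possibilities (mapping : List (String × List String)) (msg : String) : Prop :=
  msg.toList ≠ [] ∧
    (msg.toList.all (fun c => (PySem.Dict.get? (PySem.Dict.mk mapping) (String.singleton c)).isSome)) = true
instance (mapping : List (String × List String)) (msg : String) : Decidable (Pre_get_all_possibilities mapping msg) := by unfold Pre_get_all_possibilities; infer_instance

def pvWitness_get_all_possibilities : (List (String × List String)) × String :=
  ([("a", ["x", "y"]), ("b", ["z"])], "ab")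

def Spec_get_all_possibilities (mapping : List (String × List String)) (msg : String) (out : List String) : Prop := out = get_all_possibilities_alt mapping msg
instance (mapping : List (String × List String)) (msg : String) (out : List String) : Decidable (Spec_get_all_possibilities mapping msg out) := by unfold Spec_get_all_possibilities; infer_instance

-- ===== CLAIM (what is proved, stated in full; the proofs are below) =====
def Claim_equal_get_all_possibilities : Prop := ∀ (mapping : List (String × List String)) (msg : String), Dom_get_all_possibilities mapping msg → Pre_get_all_possibilities mapping msg → Spec_get_all_possibilities mapping msg (get_all_possibilities mapping msg)

-- ===== LEMMAS AND PROOFS =====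

-- the value built when A's loop consumes the characters of m starting from current_list = cur
def pvBuild (mapping : List (String × List String)) (cur : List String) : List Char → List String
  | [] => cur
  | c :: ms => pvBuild mapping ((pvLookup mapping c).flatMap (fun val => cur.map (fun x => x ++ val))) ms

theorem pvALoop_singleton (mapping : List (String × List String)) :
    ∀ (m : List Char) (cur acc : List String),
      pvALoop mapping [(cur, m)] acc = acc ++ pvBuild mapping cur m := by
  intro m
  induction m with
  | nil => intro cur acc; simp [pvALoop, pvBuild]
  | cons c ms ih =>
    intro cur acc
    rw [pvALoop, pvBuild]
    rw [PySem.List.foldl_append_eq_flatMap]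
    simpa using ih _ acc

theorem pvBuild_concat (mapping : List (String × List String)) :
    ∀ (ms : List Char) (c : Char) (cur : List String),
      pvBuild mapping cur (ms ++ [c]) =
        (pvLookup mapping c).flatMap (fun v => (pvBuild mapping cur ms).map (fun p => p ++ v)) := by
  intro ms
  induction ms with
  | nil => intro c cur; simp [pvBuild]
  | cons c' ms ih => intro c cur; simp only [List.cons_append, pvBuild]; exact ih c _

theorem pvBRec_concat (mapping : List (String × List String)) (xs : List Char) (d : Char)
    (h : xs ≠ []) :
    pvBRec mapping (xs ++ [d]) =
      (pvLookup mapping d).flatMap (fun v => (pvBRec mapping xs).map (fun p => p ++ v)) := by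
  match xs with
  | [] => exact absurd rfl h
  | [x] => simp [pvBRec]
  | x1 :: x2 :: xs' =>
    rw [show (x1 :: x2 :: xs') ++ [d] = x1 :: x2 :: (xs' ++ [d]) by simp, pvBRec]
    rw [show x1 :: x2 :: (xs' ++ [d]) = (x1 :: x2 :: xs') ++ [d] by simp,
      List.dropLast_concat]
    simp
    rw [show x2 :: (xs' ++ [d]) = (x2 :: xs') ++ [d] by simp, List.getLast?_concat,
      Option.getD_some]

theorem pvBuild_eq_pvBRec (mapping : List (String × List String)) (c : Char) (ms : List Char) :
    pvBuild mapping (pvLookup mapping c) ms = pvBRec mapping (c :: ms) := by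
  induction ms using List.reverseRecOn with
  | nil => simp [pvBuild, pvBRec]
  | append_singleton ms d ih =>
    rw [pvBuild_concat, ih, show c :: (ms ++ [d]) = (c :: ms) ++ [d] by simp,
      pvBRec_concat mapping (c :: ms) d (by simp)]

-- ===== VERDICT (by name: the statement is the Claim_ definition above) =====
theorem get_all_possibilities_spec : Claim_equal_get_all_possibilities := by
  intro mapping msg _ hpre
  unfold Spec_get_all_possibilities get_all_possibilities get_all_possibilities_alt
  match h : msg.toList with
  | [] => exact absurd h hpre.1
  | c :: ms =>
    show pvALoop mapping [(pvLookup mapping c, ms)] [] = pvBRec mapping (c :: ms)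
    rw [pvALoop_singleton, pvBuild_eq_pvBRec]
    simp
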